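-- pv_equiv track=rewrite | github.com/asiangorilla/adventcoding2023 | puzzle1.py | checkIfStringNum
-- ===== SOURCE A (Python) =====
-- Nums = ['1','2','3','4','5','6','7','8','9','one','two','three','four','five','six','seven','eight','nine']
--
-- def stringToNum(b:str):
--     for i in range(9):
--         if b.__eq__(Nums[i+9]):
--             return str(i+1)
--
-- def checkIfStringNum(a:str):
--     firstPos = -1
--     secondPos = -1
--     first = ''
--     second = ''
--     for num in Nums:
--         pos = a.find(num)
--         rpos = a.rfind(num)
--         if pos >= 0:
--             if firstPos == -1 or pos < firstPos:
--                 if not firstPos == -1 and secondPos == -1: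
--                     secondPos = firstPos
--                     second = first
--                 firstPos = pos
--                 if len(num)>1:
--                     first = stringToNum(num)
--                 else:
--                     first = num
--             elif secondPos == -1 or pos > secondPos:
--                 secondPos = pos
--                 if len(num)>1:
--                     second = stringToNum(num)
--                 else:
--                     second = num
--             if (not pos == rpos) and rpos > secondPos:
--                 secondPos = rpos
--                 if len(num)>1:
--                     second = stringToNum(num)
--                 else:
--                     second = num
--     return (first, second)
-- ===== SOURCE B (Python) =====
-- Nums = ['1','2','3','4','5','6','7','8','9','one','two','three','four','five','six','seven','eight','nine']
--
-- def stringToNum(b:str):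
--     for i in range(9):
--         if b.__eq__(Nums[i+9]):
--             return str(i+1)
--
-- def checkIfStringNum(a:str):
--     # Collect one (first_pos, last_pos, digit) record per token present, then
--     # select by min first_pos / max last_pos.
--     hits = []
--     for num in Nums:
--         p = a.find(num)
--         if p >= 0:
--             hits.append((p, a.rfind(num), num if len(num) == 1 else stringToNum(num)))
--     if not hits:
--         return ('', '')
--     lo = hi = hits[0]
--     for h in hits[1:]:
--         if h[0] < lo[0]:
--             lo = h
--         if h[1] > hi[1]:
--             hi = h
--     return (lo[2], '' if lo[0] == hi[1] else hi[2])
-- ===== Notes on version B (the rewrite author's own statement) =====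
-- stated objective: simpler
-- what changed: A's interleaved four-variable state machine (firstPos/secondPos with conditional demotion of first into second and a separate rfind patch-up step) is replaced by one pass that collects a (first_pos, last_pos, digit) record per present token and then selects the record with minimal first_pos and the record with maximal last_pos; the empty-second-component rule for a single occurrence becomes the one comparison min_first_pos == max_last_pos.
import Mathlib
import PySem

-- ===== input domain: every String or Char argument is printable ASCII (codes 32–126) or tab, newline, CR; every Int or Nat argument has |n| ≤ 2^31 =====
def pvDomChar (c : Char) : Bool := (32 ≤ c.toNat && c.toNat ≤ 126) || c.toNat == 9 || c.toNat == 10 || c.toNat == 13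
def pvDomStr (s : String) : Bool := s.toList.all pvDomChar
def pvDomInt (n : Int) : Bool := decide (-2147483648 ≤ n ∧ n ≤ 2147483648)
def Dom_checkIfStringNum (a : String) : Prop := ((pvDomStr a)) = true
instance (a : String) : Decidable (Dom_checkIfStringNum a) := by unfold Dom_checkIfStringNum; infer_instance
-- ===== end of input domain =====

-- B replaces A's four-variable first/second state machine by collecting one
-- (first_pos, last_pos, digit) record per present token and selecting by
-- min first_pos / max last_pos (objective: simpler; it also calls rfind only for
-- tokens that are present).

-- ===== PORT A =====
def Nums : List String := ["1","2","3","4","5","6","7","8","9","one","two","three","four","five","six","seven","eight","nine"]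

-- Python's stringToNum falls off its loop (returning None) when b is no word token;
-- it is only ever called on word tokens of Nums, where it returns a digit string.
-- Nums[i+9] for i in range(9) is always in range, so pyGetD is exact here.
def stringToNum (b : String) : Option String :=
  (PySem.List.pyRange 0 9 1).foldl (fun acc i =>
    match acc with
    | some _ => acc
    | none => if b == PySem.List.pyGetD Nums (i + 9) "" then some (PySem.Int.toStr (i + 1)) else none) none

def checkIfStringNum (a : String) : String × String :=
  let st := Nums.foldl (fun (st : Int × Int × String × String) num =>
    let firstPos := st.1
    let secondPos := st.2.1
    let first := st.2.2.1
    let second := st.2.2.2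
    let pos := PySem.Str.find a num
    let rpos := PySem.Str.rfind a num
    if 0 ≤ pos then
      let st1 :=
        if firstPos = -1 ∨ pos < firstPos then
          let secondPos' := if ¬ firstPos = -1 ∧ secondPos = -1 then firstPos else secondPos
          let second' := if ¬ firstPos = -1 ∧ secondPos = -1 then first else second
          -- Python's `first = stringToNum(num)` yields a str here (num is a word token of
          -- Nums); the .getD "" default is never taken
          (pos, secondPos', (if 1 < PySem.Str.len num then (stringToNum num).getD "" else num), second')
        else if secondPos = -1 ∨ secondPos < pos then
          (firstPos, pos, first, (if 1 < PySem.Str.len num then (stringToNum num).getD "" else num))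
        else (firstPos, secondPos, first, second)
      if ¬ pos = rpos ∧ st1.2.1 < rpos then
        (st1.1, rpos, st1.2.2.1, (if 1 < PySem.Str.len num then (stringToNum num).getD "" else num))
      else st1
    else (firstPos, secondPos, first, second)) (-1, -1, "", "")
  (st.2.2.1, st.2.2.2)

-- ===== PORT B =====
def checkIfStringNum_alt (a : String) : String × String :=
  let hits := Nums.foldl (fun (acc : List (Int × Int × String)) num =>
    let p := PySem.Str.find a num
    if 0 ≤ p then
      acc ++ [(p, PySem.Str.rfind a num, if PySem.Str.len num = 1 then num else (stringToNum num).getD "")]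
    else acc) []
  match hits with
  | [] => ("", "")
  | h0 :: rest =>
    let lh := rest.foldl (fun (lh : (Int × Int × String) × (Int × Int × String)) h =>
      (if h.1 < lh.1.1 then h else lh.1, if lh.2.2.1 < h.2.1 then h else lh.2)) (h0, h0)
    (lh.1.2.2, if lh.1.1 = lh.2.2.1 then "" else lh.2.2.2)

-- ===== PRECONDITION & SPEC =====
def Spec_checkIfStringNum (a : String) (out : String × String) : Prop := out = checkIfStringNum_alt a
instance (a : String) (out : String × String) : Decidable (Spec_checkIfStringNum a out) := by unfold Spec_checkIfStringNum; infer_instance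

-- ===== CLAIM (what is proved, stated in full; the proofs are below) =====
def Claim_equal_checkIfStringNum : Prop := ∀ (a : String), Dom_checkIfStringNum a → Spec_checkIfStringNum a (checkIfStringNum a)

-- ===== LEMMAS AND PROOFS =====

-- the digit value A stores for a token
def pvVal (num : String) : String := if 1 < PySem.Str.len num then (stringToNum num).getD "" else num

-- A's loop body, abstracted over the position data (find, rfind, value) of the current token
def pvStep (st : Int × Int × String × String) (p r : Int) (v : String) : Int × Int × String × String :=
  let st1 :=
    if st.1 = -1 ∨ p < st.1 then
      (p, (if ¬ st.1 = -1 ∧ st.2.1 = -1 then st.1 else st.2.1), v,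
        (if ¬ st.1 = -1 ∧ st.2.1 = -1 then st.2.2.1 else st.2.2.2))
    else if st.2.1 = -1 ∨ st.2.1 < p then (st.1, p, st.2.2.1, v)
    else st
  if ¬ p = r ∧ st1.2.1 < r then (st1.1, r, st1.2.2.1, v) else st1

-- B's selection fold, component-wise
def pvFmin (acc h : Int × Int × String) : Int × Int × String := if h.1 < acc.1 then h else acc
def pvFmax (acc h : Int × Int × String) : Int × Int × String := if acc.2.1 < h.2.1 then h else acc

-- the per-token records B collects, in filter/map form
def pvHits (a : String) (ts : List String) : List (Int × Int × String) :=
  (ts.filter (fun t => decide (0 ≤ PySem.Str.find a t))).map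
    (fun t => (PySem.Str.find a t, PySem.Str.rfind a t, pvVal t))

-- B's summary of a hit list, as a full A-state
def pvState (hits : List (Int × Int × String)) : Int × Int × String × String :=
  match hits with
  | [] => (-1, -1, "", "")
  | h0 :: rest =>
    let lo := rest.foldl pvFmin h0
    let hi := rest.foldl pvFmax h0
    if lo.1 = hi.2.1 then (lo.1, -1, lo.2.2, "") else (lo.1, hi.2.1, lo.2.2, hi.2.2)

theorem pvRfindGo (s sub : List Char) (k : Nat) :
    (PySem.Chars.rfind.go s sub k = -1 ∧ ∀ j ≤ k, ¬ sub <+: s.drop j) ∨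
    (∃ m : Nat, PySem.Chars.rfind.go s sub k = (m : Int) ∧ m ≤ k ∧ sub <+: s.drop m ∧
      ∀ j, m < j → j ≤ k → ¬ sub <+: s.drop j) := by
  induction k with
  | zero =>
    by_cases h : sub.isPrefixOf s
    · right
      exact ⟨0, by simp [PySem.Chars.rfind.go, h], le_refl 0,
        by simpa [List.isPrefixOf_iff_prefix] using h, by omega⟩
    · left
      refine ⟨by simp [PySem.Chars.rfind.go, h], ?_⟩
      intro j hj
      interval_cases j
      simpa [List.isPrefixOf_iff_prefix] using h
  | succ n ih =>
    by_cases h : sub.isPrefixOf (s.drop (n+1))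
    · right
      exact ⟨n+1, by simp [PySem.Chars.rfind.go, h], le_refl _,
        by simpa [List.isPrefixOf_iff_prefix] using h, by omega⟩
    · have hgo : PySem.Chars.rfind.go s sub (n+1) = PySem.Chars.rfind.go s sub n := by
        simp [PySem.Chars.rfind.go, h]
      have hn : ¬ sub <+: s.drop (n+1) := by
        simpa [List.isPrefixOf_iff_prefix] using h
      rcases ih with ⟨h1, h2⟩ | ⟨m, h1, h2, h3, h4⟩
      · left
        refine ⟨hgo ▸ h1, fun j hj => ?_⟩
        rcases Nat.lt_or_ge j (n+1) with hj' | hj'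
        · exact h2 j (by omega)
        · have : j = n + 1 := by omega
          subst this; exact hn
      · right
        refine ⟨m, hgo ▸ h1, by omega, h3, fun j hj1 hj2 => ?_⟩
        rcases Nat.lt_or_ge j (n+1) with hj' | hj'
        · exact h4 j hj1 (by omega)
        · have : j = n + 1 := by omega
          subst this; exact hn

def pvOcc (a t : String) (i : Nat) : Prop := t.toList <+: a.toList.drop i

-- if t occurs at i and t ≠ "", then i < len a
theorem pvOcc_lt (a t : String) (ht : t.toList ≠ []) (i : Nat) (h : pvOcc a t i) :
    i < a.toList.length := by
  by_contra hi
  have : a.toList.drop i = [] := List.drop_eq_nil_of_le (by omega)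
  rw [pvOcc, this, List.prefix_nil] at h
  exact ht h

theorem pvFind_occ (a t : String) (h : 0 ≤ PySem.Str.find a t) :
    pvOcc a t (PySem.Str.find a t).toNat := by
  rw [PySem.Str.find_eq] at h ⊢
  exact (PySem.Chars.find_spec h).1

theorem pvFind_min (a t : String) (h : 0 ≤ PySem.Str.find a t) :
    ∀ j < (PySem.Str.find a t).toNat, ¬ pvOcc a t j := by
  rw [PySem.Str.find_eq]
  exact fun j hj => (PySem.Chars.find_spec (by rwa [PySem.Str.find_eq] at h)).2 j hj

theorem pvRfind_spec (a t : String) (ht : t.toList ≠ []) (h : 0 ≤ PySem.Str.find a t) :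
    0 ≤ PySem.Str.rfind a t ∧ PySem.Str.find a t ≤ PySem.Str.rfind a t ∧
    pvOcc a t (PySem.Str.rfind a t).toNat ∧
    ∀ j, (PySem.Str.rfind a t).toNat < j → ¬ pvOcc a t j := by
  have hocc := pvFind_occ a t h
  have hlt := pvOcc_lt a t ht _ hocc
  rw [PySem.Str.rfind_eq]
  rcases pvRfindGo a.toList t.toList a.toList.length with ⟨h1, h2⟩ | ⟨m, h1, h2, h3, h4⟩
  · exact absurd hocc (h2 _ (by omega))
  · rw [PySem.Chars.rfind, h1]
    have hmge : (PySem.Str.find a t).toNat ≤ m := by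
      by_contra hmlt
      exact pvFind_min a t h m (by omega) h3
    refine ⟨by positivity, by omega, by simpa [pvOcc] using h3, fun j hj => ?_⟩
    simp only [Int.toNat_natCast] at hj
    rcases Nat.lt_or_ge j (a.toList.length + 1) with hj' | hj'
    · exact h4 j hj (by omega)
    · intro hc
      exact absurd (pvOcc_lt a t ht j hc) (by omega)

def pvDistinct (g g' : Int × Int × String) : Prop :=
  g.1 ≠ g'.1 ∧ g.1 ≠ g'.2.1 ∧ g.2.1 ≠ g'.1 ∧ g.2.1 ≠ g'.2.1

theorem pvNums_nonempty : ∀ t ∈ Nums, t.toList ≠ [] := by decide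

theorem pvNums_nopre : List.Pairwise
    (fun t1 t2 : String => ¬ t1.toList <+: t2.toList ∧ ¬ t2.toList <+: t1.toList) Nums := by decide

theorem pvNums_disj : ∀ (a : String), List.Pairwise
    (fun t1 t2 : String => ∀ i, pvOcc a t1 i → pvOcc a t2 i → False) Nums := by
  intro a
  refine pvNums_nopre.imp ?_
  intro t1 t2 ⟨h1, h2⟩ i o1 o2
  rcases List.prefix_or_prefix_of_prefix o1 o2 with h | h
  · exact h1 h
  · exact h2 h

theorem pvFmin_mem (l : List (Int × Int × String)) (x : Int × Int × String) :
    l.foldl pvFmin x = x ∨ l.foldl pvFmin x ∈ l := by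
  induction l generalizing x with
  | nil => exact .inl rfl
  | cons y t ih =>
    simp only [List.foldl_cons]
    rcases ih (pvFmin x y) with h | h
    · rw [h]; unfold pvFmin; split_ifs with hc
      · exact .inr (by simp)
      · exact .inl rfl
    · exact .inr (by simp [h])

theorem pvFmin_le (l : List (Int × Int × String)) (x : Int × Int × String) :
    (l.foldl pvFmin x).1 ≤ x.1 ∧ ∀ g ∈ l, (l.foldl pvFmin x).1 ≤ g.1 := by
  induction l generalizing x with
  | nil => simp
  | cons y t ih =>
    simp only [List.foldl_cons, List.mem_cons]
    have h1 := ih (pvFmin x y)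
    have hle : (pvFmin x y).1 ≤ x.1 ∧ (pvFmin x y).1 ≤ y.1 := by
      unfold pvFmin; split_ifs with hc <;> constructor <;> omega
    exact ⟨le_trans h1.1 hle.1, fun g hg => hg.elim (fun h => by rw [h]; exact le_trans h1.1 hle.2) (h1.2 g)⟩

theorem pvFmax_mem (l : List (Int × Int × String)) (x : Int × Int × String) :
    l.foldl pvFmax x = x ∨ l.foldl pvFmax x ∈ l := by
  induction l generalizing x with
  | nil => exact .inl rfl
  | cons y t ih =>
    simp only [List.foldl_cons]
    rcases ih (pvFmax x y) with h | h
    · rw [h]; unfold pvFmax; split_ifs with hc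
      · exact .inr (by simp)
      · exact .inl rfl
    · exact .inr (by simp [h])

theorem pvFmax_ge (l : List (Int × Int × String)) (x : Int × Int × String) :
    x.2.1 ≤ (l.foldl pvFmax x).2.1 ∧ ∀ g ∈ l, g.2.1 ≤ (l.foldl pvFmax x).2.1 := by
  induction l generalizing x with
  | nil => simp
  | cons y t ih =>
    simp only [List.foldl_cons, List.mem_cons]
    have h1 := ih (pvFmax x y)
    have hle : x.2.1 ≤ (pvFmax x y).2.1 ∧ y.2.1 ≤ (pvFmax x y).2.1 := by
      unfold pvFmax; split_ifs with hc <;> constructor <;> omega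
    exact ⟨le_trans hle.1 h1.1, fun g hg => hg.elim (fun h => by rw [h]; exact le_trans hle.2 h1.1) (h1.2 g)⟩

theorem pvLH_split (l : List (Int × Int × String)) (x y : Int × Int × String) :
    l.foldl (fun (lh : (Int × Int × String) × (Int × Int × String)) h =>
      (if h.1 < lh.1.1 then h else lh.1, if lh.2.2.1 < h.2.1 then h else lh.2)) (x, y)
    = (l.foldl pvFmin x, l.foldl pvFmax y) := by
  induction l generalizing x y with
  | nil => rfl
  | cons z t ih => simpa [pvFmin, pvFmax] using ih (pvFmin x z) (pvFmax y z)

theorem pvStep_snoc (H : List (Int × Int × String)) (h : Int × Int × String)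
    (coh : ∀ g ∈ H, 0 ≤ g.1 ∧ g.1 ≤ g.2.1)
    (hh0 : 0 ≤ h.1) (hh1 : h.1 ≤ h.2.1)
    (pw : List.Pairwise pvDistinct H)
    (fr : ∀ g ∈ H, pvDistinct g h) :
    pvStep (pvState H) h.1 h.2.1 h.2.2 = pvState (H ++ [h]) := by
  obtain ⟨p, r, v⟩ := h
  simp only at hh0 hh1 ⊢
  cases H with
  | nil =>
    simp only [pvState, pvStep, List.nil_append, List.foldl_nil]
    by_cases hpr : p = r
    · subst hpr; simp
    · have hr : (-1 : Int) < r := by omega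
      simp [hpr, hr]
  | cons h0 rest =>
    have hsym : ∀ g g' : Int × Int × String, pvDistinct g g' → pvDistinct g' g := by
      rintro g g' ⟨a, b, c, d⟩; exact ⟨a.symm, c.symm, b.symm, d.symm⟩
    have hloH : rest.foldl pvFmin h0 ∈ h0 :: rest := by
      rcases pvFmin_mem rest h0 with h | h
      · rw [h]; exact List.mem_cons_self
      · exact List.mem_cons_of_mem _ h
    have hhiH : rest.foldl pvFmax h0 ∈ h0 :: rest := by
      rcases pvFmax_mem rest h0 with h | h
      · rw [h]; exact List.mem_cons_self
      · exact List.mem_cons_of_mem _ h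
    set lo := rest.foldl pvFmin h0 with hlo
    set hi := rest.foldl pvFmax h0 with hhi
    have hlomin : ∀ g ∈ h0 :: rest, lo.1 ≤ g.1 := by
      intro g hg
      rcases List.mem_cons.mp hg with rfl | hg
      · exact (pvFmin_le rest g).1
      · exact (pvFmin_le rest h0).2 g hg
    have hhimax : ∀ g ∈ h0 :: rest, g.2.1 ≤ hi.2.1 := by
      intro g hg
      rcases List.mem_cons.mp hg with rfl | hg
      · exact (pvFmax_ge rest g).1
      · exact (pvFmax_ge rest h0).2 g hg
    have hcoh_lo := coh lo hloH
    have hcoh_hi := coh hi hhiH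
    have hle : lo.1 ≤ hi.2.1 := le_trans (hlomin hi hhiH) hcoh_hi.2
    obtain ⟨hfl1, hfl2, hfl3, hfl4⟩ := fr lo hloH
    obtain ⟨hfh1, hfh2, hfh3, hfh4⟩ := fr hi hhiH
    simp only at hfl1 hfl2 hfl3 hfl4 hfh1 hfh2 hfh3 hfh4
    have hkey : lo.1 = hi.2.1 → lo = hi := by
      intro he
      by_contra hne
      exact (pw.forall hsym hloH hhiH hne).2.1 he
    have happ : (h0 :: rest) ++ [((p : Int), (r : Int), v)] = h0 :: (rest ++ [(p, r, v)]) := rfl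
    rw [happ]
    simp only [pvState, List.foldl_append, List.foldl_cons, List.foldl_nil, ← hlo, ← hhi]
    by_cases hE : lo.1 = hi.2.1
    · -- single distinct position: lo = hi, state (lo.1, -1, lo.2.2, "")
      have hlohi := hkey hE
      rw [← hlohi] at hE hfh1 hfh2 hfh3 hfh4 hcoh_hi ⊢
      rw [if_pos hE]
      have h0le : (0 : Int) ≤ lo.1 := hcoh_lo.1
      rcases lt_or_gt_of_ne hfl1.symm with hp | hp
      · -- p < lo.1
        have e1 : pvFmin lo (p, r, v) = (p, r, v) := by
          rw [pvFmin]; try dsimp only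
          rw [if_pos hp]
        have eL : pvStep (lo.1, -1, lo.2.2, "") p r v
            = if ¬ p = r ∧ lo.1 < r then (p, r, v, v) else (p, lo.1, v, lo.2.2) := by
          simp only [pvStep]
          try dsimp only
          rw [if_pos (Or.inr hp)]
          simp only [if_pos (show ¬lo.1 = -1 ∧ True from ⟨by omega, trivial⟩)]
          try dsimp only
        rw [eL, e1]
        rcases lt_or_gt_of_ne (show lo.1 ≠ r from hfl2) with hr | hr
        · -- lo.1 < r
          have e2 : pvFmax lo (p, r, v) = (p, r, v) := by
            rw [pvFmax]; try dsimp only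
            rw [if_pos (show lo.2.1 < r by omega)]
          rw [e2, if_pos (show ¬ p = r ∧ lo.1 < r from ⟨by omega, hr⟩)]
          try dsimp only
          rw [if_neg (show ¬ (p = r) by omega)]
        · -- r < lo.1
          have e2 : pvFmax lo (p, r, v) = lo := by
            rw [pvFmax]; try dsimp only
            rw [if_neg (show ¬ lo.2.1 < r by omega)]
          rw [e2, if_neg (show ¬ (¬ p = r ∧ lo.1 < r) by omega)]
          try dsimp only
          rw [if_neg (show ¬ (p = lo.2.1) by omega)]
          rw [hE]
      · -- lo.1 < p
        have e1 : pvFmin lo (p, r, v) = lo := by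
          rw [pvFmin]; try dsimp only
          rw [if_neg (show ¬ p < lo.1 by omega)]
        have e2 : pvFmax lo (p, r, v) = (p, r, v) := by
          rw [pvFmax]; try dsimp only
          rw [if_pos (show lo.2.1 < r by omega)]
        have eL : pvStep (lo.1, -1, lo.2.2, "") p r v
            = if ¬ p = r ∧ p < r then (lo.1, r, lo.2.2, v) else (lo.1, p, lo.2.2, v) := by
          simp only [pvStep]
          try dsimp only
          rw [if_neg (show ¬ (lo.1 = -1 ∨ p < lo.1) by omega),
            if_pos (show True ∨ (-1 : Int) < p from Or.inl trivial)]
          try dsimp only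
        rw [eL, e1, e2]
        try dsimp only
        rw [if_neg (show ¬ (lo.1 = r) by omega)]
        by_cases hpr : p = r
        · rw [if_neg (show ¬ (¬ p = r ∧ p < r) by omega), hpr]
        · rw [if_pos (show ¬ p = r ∧ p < r from ⟨hpr, by omega⟩)]
    · -- two distinct positions: state (lo.1, hi.2.1, lo.2.2, hi.2.2)
      have hlt : lo.1 < hi.2.1 := lt_of_le_of_ne hle hE
      have h0le : (0 : Int) ≤ lo.1 := hcoh_lo.1
      rw [if_neg hE]
      rcases lt_or_gt_of_ne hfl1.symm with hp | hp
      · -- p < lo.1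
        have e1 : pvFmin lo (p, r, v) = (p, r, v) := by
          rw [pvFmin]; try dsimp only
          rw [if_pos hp]
        have eL : pvStep (lo.1, hi.2.1, lo.2.2, hi.2.2) p r v
            = if ¬ p = r ∧ hi.2.1 < r then (p, r, v, v) else (p, hi.2.1, v, hi.2.2) := by
          simp only [pvStep]
          try dsimp only
          rw [if_pos (Or.inr hp)]
          simp only [if_neg (show ¬ (¬lo.1 = -1 ∧ hi.2.1 = -1) by omega)]
          try dsimp only
        rw [eL, e1]
        rcases lt_or_gt_of_ne (show hi.2.1 ≠ r from hfh4) with hr | hr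
        · -- hi.2.1 < r
          have e2 : pvFmax hi (p, r, v) = (p, r, v) := by
            rw [pvFmax]; try dsimp only
            rw [if_pos hr]
          rw [e2, if_pos (show ¬ p = r ∧ hi.2.1 < r from ⟨by omega, hr⟩)]
          try dsimp only
          rw [if_neg (show ¬ (p = r) by omega)]
        · -- r < hi.2.1
          have e2 : pvFmax hi (p, r, v) = hi := by
            rw [pvFmax]; try dsimp only
            rw [if_neg (show ¬ hi.2.1 < r by omega)]
          rw [e2, if_neg (show ¬ (¬ p = r ∧ hi.2.1 < r) by omega)]
          try dsimp only
          rw [if_neg (show ¬ (p = hi.2.1) by omega)]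
      · -- lo.1 < p
        have e1 : pvFmin lo (p, r, v) = lo := by
          rw [pvFmin]; try dsimp only
          rw [if_neg (show ¬ p < lo.1 by omega)]
        rcases lt_or_gt_of_ne (show hi.2.1 ≠ p from hfh3) with hpp | hpp
        · -- hi.2.1 < p
          have e2 : pvFmax hi (p, r, v) = (p, r, v) := by
            rw [pvFmax]; try dsimp only
            rw [if_pos (show hi.2.1 < r by omega)]
          have eL : pvStep (lo.1, hi.2.1, lo.2.2, hi.2.2) p r v
              = if ¬ p = r ∧ p < r then (lo.1, r, lo.2.2, v) else (lo.1, p, lo.2.2, v) := by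
            simp only [pvStep]
            try dsimp only
            rw [if_neg (show ¬ (lo.1 = -1 ∨ p < lo.1) by omega),
              if_pos (Or.inr hpp)]
            try dsimp only
          rw [eL, e1, e2]
          try dsimp only
          rw [if_neg (show ¬ (lo.1 = r) by omega)]
          by_cases hpr : p = r
          · rw [if_neg (show ¬ (¬ p = r ∧ p < r) by omega), hpr]
          · rw [if_pos (show ¬ p = r ∧ p < r from ⟨hpr, by omega⟩)]
        · -- lo.1 < p < hi.2.1
          have eL : pvStep (lo.1, hi.2.1, lo.2.2, hi.2.2) p r v
              = if ¬ p = r ∧ hi.2.1 < r then (lo.1, r, lo.2.2, v) else (lo.1, hi.2.1, lo.2.2, hi.2.2) := by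
            simp only [pvStep]
            try dsimp only
            rw [if_neg (show ¬ (lo.1 = -1 ∨ p < lo.1) by omega),
              if_neg (show ¬ (hi.2.1 = -1 ∨ hi.2.1 < p) by omega)]
            try dsimp only
          rw [eL, e1]
          rcases lt_or_gt_of_ne (show hi.2.1 ≠ r from hfh4) with hr | hr
          · -- hi.2.1 < r
            have e2 : pvFmax hi (p, r, v) = (p, r, v) := by
              rw [pvFmax]; try dsimp only
              rw [if_pos hr]
            rw [e2, if_pos (show ¬ p = r ∧ hi.2.1 < r from ⟨by omega, hr⟩)]
            try dsimp only
            rw [if_neg (show ¬ (lo.1 = r) by omega)]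
          · -- r < hi.2.1
            have e2 : pvFmax hi (p, r, v) = hi := by
              rw [pvFmax]; try dsimp only
              rw [if_neg (show ¬ hi.2.1 < r by omega)]
            rw [e2, if_neg (show ¬ (¬ p = r ∧ hi.2.1 < r) by omega)]
            try dsimp only
            rw [if_neg (show ¬ (lo.1 = hi.2.1) by omega)]

-- the two freshness/distinctness bridges from token-level disjointness
theorem pvDistinct_of_disj (a t1 t2 : String) (h1 : t1.toList ≠ []) (h2 : t2.toList ≠ [])
    (hf1 : 0 ≤ PySem.Str.find a t1) (hf2 : 0 ≤ PySem.Str.find a t2)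
    (hd : ∀ i, pvOcc a t1 i → pvOcc a t2 i → False) :
    pvDistinct (PySem.Str.find a t1, PySem.Str.rfind a t1, pvVal t1)
      (PySem.Str.find a t2, PySem.Str.rfind a t2, pvVal t2) := by
  obtain ⟨hr1, hfr1, ho1, _⟩ := pvRfind_spec a t1 h1 hf1
  obtain ⟨hr2, hfr2, ho2, _⟩ := pvRfind_spec a t2 h2 hf2
  have hof1 := pvFind_occ a t1 hf1
  have hof2 := pvFind_occ a t2 hf2
  refine ⟨fun he => ?_, fun he => ?_, fun he => ?_, fun he => ?_⟩ <;> dsimp only at he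
  · exact hd _ hof1 ((congrArg Int.toNat he).symm ▸ hof2)
  · exact hd _ hof1 ((congrArg Int.toNat he).symm ▸ ho2)
  · exact hd _ ho1 ((congrArg Int.toNat he).symm ▸ hof2)
  · exact hd _ ho1 ((congrArg Int.toNat he).symm ▸ ho2)

theorem pvHits_coh (a : String) (ts : List String) (hne : ∀ t ∈ ts, t.toList ≠ []) :
    ∀ g ∈ pvHits a ts, 0 ≤ g.1 ∧ g.1 ≤ g.2.1 := by
  intro g hg
  simp only [pvHits, List.mem_map, List.mem_filter] at hg
  obtain ⟨t, ⟨ht, hf⟩, rfl⟩ := hg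
  have hf' : 0 ≤ PySem.Str.find a t := of_decide_eq_true hf
  exact ⟨hf', (pvRfind_spec a t (hne t ht) hf').2.1⟩

theorem pvFold_eq (a : String) (ts : List String) (hne : ∀ t ∈ ts, t.toList ≠ [])
    (hpw : List.Pairwise (fun t1 t2 => ∀ i, pvOcc a t1 i → pvOcc a t2 i → False) ts) :
    ts.foldl (fun st num =>
      if 0 ≤ PySem.Str.find a num then
        pvStep st (PySem.Str.find a num) (PySem.Str.rfind a num) (pvVal num)
      else st) (-1, -1, "", "")
    = pvState (pvHits a ts) := by
  induction ts using List.reverseRecOn with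
  | nil => rfl
  | append_singleton ts t ih =>
    rw [List.pairwise_append] at hpw
    obtain ⟨hts, -, hcross⟩ := hpw
    have hne' : ∀ t' ∈ ts, t'.toList ≠ [] := fun t' ht' => hne t' (by simp [ht'])
    have hnet : t.toList ≠ [] := hne t (by simp)
    rw [List.foldl_append, ih hne' hts, List.foldl_cons, List.foldl_nil]
    by_cases hf : 0 ≤ PySem.Str.find a t
    · rw [if_pos hf]
      have hhits : pvHits a (ts ++ [t]) = pvHits a ts
          ++ [(PySem.Str.find a t, PySem.Str.rfind a t, pvVal t)] := by
        rw [pvHits, pvHits, List.filter_append, List.map_append]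
        simp only [List.filter_cons, List.filter_nil]
        rw [if_pos (by simpa using hf)]
        rfl
      rw [hhits]
      have hrs := pvRfind_spec a t hnet hf
      refine pvStep_snoc (pvHits a ts) (PySem.Str.find a t, PySem.Str.rfind a t, pvVal t)
        (pvHits_coh a ts hne') hf hrs.2.1 ?_ ?_
      · rw [pvHits, List.pairwise_map]
        refine List.Pairwise.imp_of_mem ?_ (hts.filter _)
        intro t1 t2 h1 h2 hd
        exact pvDistinct_of_disj a t1 t2
          (hne' t1 (List.mem_filter.mp h1).1) (hne' t2 (List.mem_filter.mp h2).1)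
          (of_decide_eq_true (List.mem_filter.mp h1).2) (of_decide_eq_true (List.mem_filter.mp h2).2) hd
      · intro g hg
        simp only [pvHits, List.mem_map, List.mem_filter] at hg
        obtain ⟨t', ⟨ht', hf'⟩, rfl⟩ := hg
        exact pvDistinct_of_disj a t' t (hne' t' ht') hnet
          (of_decide_eq_true hf') hf (hcross t' ht' t (by simp))
    · rw [if_neg hf]
      have hflt : List.filter (fun t' => decide (0 ≤ PySem.Str.find a t')) [t] = [] := by
        simp only [List.filter_cons, List.filter_nil]
        rw [if_neg (by simpa using hf)]
      have hhits : pvHits a (ts ++ [t]) = pvHits a ts := by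
        rw [pvHits, pvHits, List.filter_append, hflt, List.append_nil]
      rw [hhits]

theorem pvA_eq (a : String) : checkIfStringNum a
    = ((pvState (pvHits a Nums)).2.2.1, (pvState (pvHits a Nums)).2.2.2) := by
  have h : checkIfStringNum a =
      (let st := Nums.foldl (fun st num =>
        if 0 ≤ PySem.Str.find a num then
          pvStep st (PySem.Str.find a num) (PySem.Str.rfind a num) (pvVal num)
        else st) (-1, -1, "", "");
       (st.2.2.1, st.2.2.2)) := rfl
  rw [h, pvFold_eq a Nums pvNums_nonempty (pvNums_disj a)]

theorem pvB_eq (a : String) : checkIfStringNum_alt a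
    = ((pvState (pvHits a Nums)).2.2.1, (pvState (pvHits a Nums)).2.2.2) := by
  have hv : Nums.foldl (fun (acc : List (Int × Int × String)) num =>
      if 0 ≤ PySem.Str.find a num then
        acc ++ [(PySem.Str.find a num, PySem.Str.rfind a num,
          if PySem.Str.len num = 1 then num else (stringToNum num).getD "")]
      else acc) []
      = Nums.foldl (fun (acc : List (Int × Int × String)) num =>
      if 0 ≤ PySem.Str.find a num then
        acc ++ [(PySem.Str.find a num, PySem.Str.rfind a num, pvVal num)]
      else acc) [] := by
    refine PySem.List.foldl_congr_mem _ _ _ _ ?_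
    intro acc num hmem
    have hval : (if PySem.Str.len num = 1 then num else (stringToNum num).getD "") = pvVal num := by
      revert hmem; revert num; decide
    rw [hval]
  have h1 : checkIfStringNum_alt a =
      (match pvHits a Nums with
       | [] => ("", "")
       | h0 :: rest =>
         let lh := rest.foldl (fun (lh : (Int × Int × String) × (Int × Int × String)) (h : Int × Int × String) =>
           (if h.1 < lh.1.1 then h else lh.1, if lh.2.2.1 < h.2.1 then h else lh.2)) (h0, h0)
         (lh.1.2.2, if lh.1.1 = lh.2.2.1 then "" else lh.2.2.2)) := by
    show (match Nums.foldl (fun (acc : List (Int × Int × String)) num =>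
      if 0 ≤ PySem.Str.find a num then
        acc ++ [(PySem.Str.find a num, PySem.Str.rfind a num,
          if PySem.Str.len num = 1 then num else (stringToNum num).getD "")]
      else acc) [] with
       | [] => ("", "")
       | h0 :: rest =>
         let lh := rest.foldl (fun (lh : (Int × Int × String) × (Int × Int × String)) (h : Int × Int × String) =>
           (if h.1 < lh.1.1 then h else lh.1, if lh.2.2.1 < h.2.1 then h else lh.2)) (h0, h0)
         (lh.1.2.2, if lh.1.1 = lh.2.2.1 then "" else lh.2.2.2)) = _
    rw [hv, PySem.List.foldl_append_ite (p := fun num => 0 ≤ PySem.Str.find a num)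
      (f := fun num => (PySem.Str.find a num, PySem.Str.rfind a num, pvVal num)), List.nil_append]
    rfl
  rw [h1]
  cases hcase : pvHits a Nums with
  | nil => rfl
  | cons h0 rest =>
    simp only
    rw [pvLH_split, pvState]
    by_cases hc : (rest.foldl pvFmin h0).1 = (rest.foldl pvFmax h0).2.1
    · rw [if_pos hc, if_pos hc]
    · rw [if_neg hc, if_neg hc]

-- ===== VERDICT (by name: the statement is the Claim_ definition above) =====
theorem checkIfStringNum_spec : Claim_equal_checkIfStringNum := by
  intro a _
  unfold Spec_checkIfStringNum
  rw [pvA_eq, pvB_eq]
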